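-- pv_equiv track=rewrite | github.com/cacsoftware/pyeay | pyeay/formato.py | extraerCant_idProducto
-- ===== SOURCE A (Python) =====
-- import string
--
-- def extraerCant_idProducto(cad):
--     lista = []
--     sw = 0
--     num1 = ''
--     num2 = ''
--     i = 0
--     for i in range(len(cad)):
--         if cad[i] in string.digits:
--             num1 += cad[i]
--             sw = 1
--         else:
--             if sw == 1:
--                 break
--     cad2 = cad[i + 1:]
--     sw = 0
--     for j in range(len(cad2)):
--         if cad2[j] in string.digits:
--             num2 += cad2[j]
--             sw = 1
--         else:
--             if sw == 1:
--                 break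
--     if num1 != '':
--         lista.append(num1)
--     if num2 != '':
--         lista.append(num2)
--
--     return lista
-- ===== SOURCE B (Python) =====
-- import re
--
-- def extraerCant_idProducto(cad):
--     return re.findall(r'[0-9]+', cad)[:2]
-- ===== Notes on version B (the rewrite author's own statement) =====
-- stated objective: idiomatic
-- what changed: Replaces A's two manual index loops with early break, index bookkeeping and the cad2 slice by a single re.findall(r'[0-9]+', cad)[:2] that collects maximal digit runs in one scan and takes the first two.
import Mathlib
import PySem

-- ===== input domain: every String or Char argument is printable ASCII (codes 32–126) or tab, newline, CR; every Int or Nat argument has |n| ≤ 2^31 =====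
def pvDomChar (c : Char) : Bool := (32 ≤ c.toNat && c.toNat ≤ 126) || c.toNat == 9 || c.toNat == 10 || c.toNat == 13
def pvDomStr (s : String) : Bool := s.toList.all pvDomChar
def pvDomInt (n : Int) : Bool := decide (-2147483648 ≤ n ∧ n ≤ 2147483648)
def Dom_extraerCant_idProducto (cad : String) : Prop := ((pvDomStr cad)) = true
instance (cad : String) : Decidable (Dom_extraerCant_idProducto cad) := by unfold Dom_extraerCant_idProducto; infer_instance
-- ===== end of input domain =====

-- B replaces A's two index loops + slice by one scan over all maximal digit runs (re.findall)[:2]; objective: idiomatic, same cost.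

-- `c in string.digits` (= the regex class [0-9]): exact for every Char
def isDig (c : Char) : Bool := '0' ≤ c && c ≤ '9'

-- ===== PORT A =====
-- first for-loop of A: arguments are (remaining chars, iCur = index of the head char, iPrev = last value of i, sw, num1); returns (i, num1)
def loop1 : List Char → Nat → Nat → Nat → List Char → Nat × List Char
  | [], _, iPrev, _, num => (iPrev, num)
  | c :: rest, iCur, _, sw, num =>
    if isDig c then loop1 rest (iCur + 1) iCur 1 (num ++ [c])
    else if sw = 1 then (iCur, num)
    else loop1 rest (iCur + 1) iCur sw num

-- second for-loop of A: (remaining chars, sw, num2); returns num2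
def loop2 : List Char → Nat → List Char → List Char
  | [], _, num => num
  | c :: rest, sw, num =>
    if isDig c then loop2 rest 1 (num ++ [c])
    else if sw = 1 then num
    else loop2 rest sw num

def extraerCant_idProducto (cad : String) : List String :=
  let cs := cad.toList
  let r := loop1 cs 0 0 0 []
  let cad2 := cs.drop (r.1 + 1)     -- cad[i+1:] with i+1 ≥ 0: Python slice = drop
  let num2 := loop2 cad2 0 []
  (if r.2 ≠ [] then [String.mk r.2] else []) ++ (if num2 ≠ [] then [String.mk num2] else [])

-- ===== PORT B =====
-- re.findall(r'[0-9]+', cad): one scan collecting the maximal digit runs, in order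
def runsAux : List Char → List Char → List (List Char)
  | [], acc => if acc = [] then [] else [acc]
  | c :: rest, acc =>
    if isDig c then runsAux rest (acc ++ [c])
    else if acc = [] then runsAux rest [] else acc :: runsAux rest []

def extraerCant_idProducto_alt (cad : String) : List String :=
  ((runsAux cad.toList []).map String.mk).take 2

-- ===== PRECONDITION & SPEC =====
def Spec_extraerCant_idProducto (cad : String) (out : List String) : Prop := out = extraerCant_idProducto_alt cad
instance (cad : String) (out : List String) : Decidable (Spec_extraerCant_idProducto cad out) := by unfold Spec_extraerCant_idProducto; infer_instance

-- ===== CLAIM (what is proved, stated in full; the proofs are below) =====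
def Claim_equal_extraerCant_idProducto : Prop := ∀ (cad : String), Dom_extraerCant_idProducto cad → Spec_extraerCant_idProducto cad (extraerCant_idProducto cad)

-- ===== LEMMAS AND PROOFS =====

-- loop2 with sw = 1: appends exactly the maximal digit run ahead
theorem loop2_run (cs : List Char) : ∀ acc, loop2 cs 1 acc = acc ++ cs.takeWhile isDig := by
  induction cs with
  | nil => intro acc; simp [loop2]
  | cons c rest ih =>
    intro acc
    by_cases h : isDig c = true <;> simp [loop2, h, List.takeWhile_cons, ih]

-- loop2 with sw = 0, empty num: skips the non-digit prefix
theorem loop2_skip (cs : List Char) : loop2 cs 0 [] = loop2 (cs.dropWhile (fun c => !isDig c)) 0 [] := by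
  induction cs with
  | nil => rfl
  | cons c rest ih =>
    by_cases h : isDig c = true <;> simp [loop2, h, List.dropWhile_cons, ih]

-- loop1 with sw = 1 and head at index k+1
theorem loop1_run (cs : List Char) : ∀ k acc, loop1 cs (k + 1) k 1 acc =
    (if cs.takeWhile isDig = cs then k + cs.length else k + (cs.takeWhile isDig).length + 1,
     acc ++ cs.takeWhile isDig) := by
  induction cs with
  | nil => intro k acc; simp [loop1]
  | cons c rest ih =>
    intro k acc
    by_cases h : isDig c = true
    · have := ih (k + 1) (acc ++ [c])
      simp only [loop1, h, if_true, this, List.takeWhile_cons, h]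
      by_cases h2 : rest.takeWhile isDig = rest
      · simp [h2]; omega
      · have : ¬ (c :: rest.takeWhile isDig = c :: rest) := by simp [h2]
        simp [h2, this]; omega
    · simp [loop1, h, List.takeWhile_cons, h]

-- loop1 with sw = 0, empty num, head at index k (initially k = 0, and the skipping phase preserves j + 1 = k)
theorem loop1_skip (cs : List Char) : ∀ k j, (j + 1 = k ∨ (k = 0 ∧ j = 0)) → loop1 cs k j 0 [] =
    (if (cs.dropWhile (fun c => !isDig c)).takeWhile isDig = cs.dropWhile (fun c => !isDig c)
       then k + cs.length - 1
       else k + (cs.takeWhile (fun c => !isDig c)).length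
              + ((cs.dropWhile (fun c => !isDig c)).takeWhile isDig).length,
     (cs.dropWhile (fun c => !isDig c)).takeWhile isDig) := by
  induction cs with
  | nil => intro k j hj; simp [loop1]; omega
  | cons c rest ih =>
    intro k j hj
    by_cases h : isDig c = true
    · -- digit head: run phase, nd = [], t = c :: rest
      have hstep : loop1 (c :: rest) k j 0 [] = loop1 rest (k + 1) k 1 ([] ++ [c]) := by
        simp [loop1, h]
      rw [hstep, loop1_run]
      rw [List.dropWhile_cons, List.takeWhile_cons]
      simp only [h, Bool.not_true, Bool.false_eq_true, if_false, if_true, reduceIte]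
      rw [List.takeWhile_cons]
      simp only [h, if_true, reduceIte]
      by_cases h2 : rest.takeWhile isDig = rest
      · rw [if_pos h2, if_pos (by rw [h2])]
        refine Prod.ext ?_ (by simp)
        simp only [List.length_cons, List.length_nil, List.length_append]; omega
      · rw [if_neg h2, if_neg (by simpa using h2)]
        refine Prod.ext ?_ (by simp)
        simp only [List.length_cons, List.length_nil, List.length_append]; omega
    · -- non-digit head, sw = 0: skip
      have hstep : loop1 (c :: rest) k j 0 [] = loop1 rest (k + 1) k 0 [] := by
        simp [loop1, h]
      rw [hstep, ih (k + 1) k (Or.inl rfl)]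
      rw [List.dropWhile_cons, List.takeWhile_cons]
      simp only [h, Bool.not_false, if_true, Bool.false_eq_true, reduceIte]
      by_cases h2 : (rest.dropWhile (fun c => !isDig c)).takeWhile isDig
          = rest.dropWhile (fun c => !isDig c)
      · rw [if_pos h2, if_pos h2]
        refine Prod.ext ?_ rfl
        simp only [List.length_cons, List.length_nil, List.length_append]; omega
      · rw [if_neg h2, if_neg h2]
        refine Prod.ext ?_ rfl
        simp only [List.length_cons, List.length_nil, List.length_append]; omega

-- runsAux with empty acc skips the non-digit prefix
theorem runsAux_skip (cs : List Char) : runsAux cs [] = runsAux (cs.dropWhile (fun c => !isDig c)) [] := by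
  induction cs with
  | nil => rfl
  | cons c rest ih =>
    by_cases h : isDig c = true <;> simp [runsAux, h, List.dropWhile_cons, ih]

-- runsAux with a started run: emits acc ++ run, then continues after the terminating character
theorem runsAux_run (cs : List Char) : ∀ acc, acc ≠ [] → runsAux cs acc =
    (acc ++ cs.takeWhile isDig) ::
      (if cs.takeWhile isDig = cs then []
       else runsAux (cs.drop ((cs.takeWhile isDig).length + 1)) []) := by
  induction cs with
  | nil => intro acc ha; simp [runsAux, ha]
  | cons c rest ih =>
    intro acc ha
    by_cases h : isDig c = true
    · have := ih (acc ++ [c]) (by simp)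
      simp only [runsAux, h, if_true, this, List.takeWhile_cons, h]
      by_cases h2 : rest.takeWhile isDig = rest
      · have : (c :: rest.takeWhile isDig = c :: rest) := by simp [h2]
        simp [h2, this]
      · have : ¬ (c :: rest.takeWhile isDig = c :: rest) := by simp [h2]
        simp [h2, this, List.drop_succ_cons]
    · have : ¬ ((List.takeWhile isDig (c :: rest)) = c :: rest) := by
        simp [List.takeWhile_cons, h]
      simp [runsAux, h, ha, List.takeWhile_cons, this]

-- the tail of A's result equals the tail of B's result, on any remainder list
theorem tail_eq (cs : List Char) :
    (if loop2 cs 0 [] ≠ [] then [String.mk (loop2 cs 0 [])] else []) =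
      ((runsAux cs []).map String.mk).take 1 := by
  rw [loop2_skip, runsAux_skip]
  cases hT : cs.dropWhile (fun c => !isDig c) with
  | nil => simp [loop2, runsAux]
  | cons d t' =>
    have hd : isDig d = true := by
      have := List.head_dropWhile_not (fun c => !isDig c) (l := cs)
      rw [hT] at this; simpa using this (by simp)
    have h2 : loop2 (d :: t') 0 [] = [d] ++ t'.takeWhile isDig := by
      simp [loop2, hd, loop2_run]
    have h3 := runsAux_run t' [d] (by simp)
    have h4 : runsAux (d :: t') [] = runsAux t' [d] := by simp [runsAux, hd]
    rw [h2, h4, h3]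
    by_cases h5 : t'.takeWhile isDig = t' <;> simp [h5]

-- main list-level equivalence
theorem main_eq (cs : List Char) :
    (let r := loop1 cs 0 0 0 []
     let num2 := loop2 (cs.drop (r.1 + 1)) 0 []
     (if r.2 ≠ [] then [String.mk r.2] else []) ++ (if num2 ≠ [] then [String.mk num2] else [])) =
      ((runsAux cs []).map String.mk).take 2 := by
  have h1 := loop1_skip cs 0 0 (Or.inr ⟨rfl, rfl⟩)
  simp only [Nat.zero_add] at h1
  rw [runsAux_skip]
  cases hT : cs.dropWhile (fun c => !isDig c) with
  | nil =>
    -- no digit at all: num1 = [], cad2 past the end, num2 = []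
    rw [hT] at h1
    simp only [List.takeWhile_nil, if_pos rfl] at h1
    have hdrop : cs.drop (cs.length - 1 + 1) = [] := by
      apply List.drop_eq_nil_of_le; omega
    simp [h1, hdrop, loop2, runsAux]
  | cons d t' =>
    have hd : isDig d = true := by
      have := List.head_dropWhile_not (fun c => !isDig c) (l := cs)
      rw [hT] at this; simpa using this (by simp)
    have hsplit : cs.takeWhile (fun c => !isDig c) ++ d :: t' = cs := by
      rw [← hT]; exact List.takeWhile_append_dropWhile
    rw [hT] at h1
    rw [List.takeWhile_cons] at h1
    simp only [hd, if_true, reduceIte] at h1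
    have h4 : runsAux (d :: t') [] = runsAux t' [d] := by simp [runsAux, hd]
    rw [h4, runsAux_run t' [d] (by simp)]
    by_cases h2 : t'.takeWhile isDig = t'
    · -- the first run reaches the end of the string
      rw [if_pos (by rw [h2] : d :: t'.takeWhile isDig = d :: t')] at h1
      have hdrop : cs.drop (cs.length - 1 + 1) = [] := by
        apply List.drop_eq_nil_of_le; omega
      simp [h1, hdrop, loop2, h2]
    · -- the first run is terminated by a non-digit; A continues right after it, B likewise
      rw [if_neg (by simpa using h2)] at h1
      have hdrop : cs.drop ((cs.takeWhile (fun c => !isDig c)).length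
            + (d :: t'.takeWhile isDig).length + 1)
          = t'.drop ((t'.takeWhile isDig).length + 1) := by
        set nd := cs.takeWhile (fun c => !isDig c) with hnd
        rw [← hsplit]
        rw [show nd.length + (d :: t'.takeWhile isDig).length + 1
              = nd.length + ((t'.takeWhile isDig).length + 2) by
              simp only [List.length_cons]; omega]
        rw [List.drop_length_add_append]
        simp [List.drop_succ_cons]
      simp only [h1, hdrop, if_neg h2]
      rw [List.map_cons, List.take_succ_cons, ← tail_eq (t'.drop ((t'.takeWhile isDig).length + 1))]
      simp

-- ===== VERDICT (by name: the statement is the Claim_ definition above) =====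
theorem extraerCant_idProducto_spec : Claim_equal_extraerCant_idProducto := by
  intro cad _
  unfold Spec_extraerCant_idProducto extraerCant_idProducto extraerCant_idProducto_alt
  exact main_eq cad.toList
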